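-- pv_equiv track=rewrite | github.com/lambdaofgod/github_search | github_search/python_code_analysis.py | segment_contiguous
-- ===== SOURCE A (Python) =====
-- def segment_contiguous(items, indices, neighbor_threshold):
--     if len(items) == 0:
--         return []
--     returned_items = []
--     tmp = [items[0]]
--     for i in range(1, len(items)):
--         if indices[i] - indices[i - 1] <= neighbor_threshold:
--             tmp.append(items[i])
--         else:
--             returned_items.append(tmp)
--             tmp = [items[i]]
--     returned_items.append(tmp)
--     return returned_items
-- ===== SOURCE B (Python) =====
-- def segment_contiguous(items, indices, neighbor_threshold):
--     if len(items) == 0: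
--         return []
--     boundaries = [0]
--     for i in range(1, len(items)):
--         if indices[i] - indices[i - 1] > neighbor_threshold:
--             boundaries.append(i)
--     boundaries.append(len(items))
--     return [items[b:e] for b, e in zip(boundaries, boundaries[1:])]
-- ===== Notes on version B (the rewrite author's own statement) =====
-- stated objective: alternative
-- what changed: B first computes the list of cut positions (boundaries) from the index gaps and then materialises the groups by slicing items between consecutive boundaries, instead of A's single pass that grows a tmp group and flushes it into the result at each gap.
import Mathlib
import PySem

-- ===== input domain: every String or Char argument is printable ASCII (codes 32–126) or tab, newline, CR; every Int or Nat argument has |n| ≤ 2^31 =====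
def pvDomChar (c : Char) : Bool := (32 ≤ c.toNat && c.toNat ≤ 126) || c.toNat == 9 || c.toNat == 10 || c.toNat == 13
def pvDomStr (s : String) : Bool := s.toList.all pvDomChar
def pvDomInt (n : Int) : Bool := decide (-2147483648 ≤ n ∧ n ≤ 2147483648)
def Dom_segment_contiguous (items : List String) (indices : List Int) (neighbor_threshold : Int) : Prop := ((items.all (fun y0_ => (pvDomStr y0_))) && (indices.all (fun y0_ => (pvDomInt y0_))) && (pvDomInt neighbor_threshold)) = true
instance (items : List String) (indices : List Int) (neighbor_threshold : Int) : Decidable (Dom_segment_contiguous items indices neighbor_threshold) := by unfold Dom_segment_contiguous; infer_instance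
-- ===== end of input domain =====

-- B computes gap-cut boundary positions first and then slices items between consecutive
-- boundaries, instead of A's accumulate-and-flush single pass; objective: alternative decomposition.


-- ===== PORT A =====
-- one loop step of A: state is (returned_items, tmp)
def segAStep (items : List String) (indices : List Int) (neighbor_threshold : Int)
    (st : List (List String) × List String) (i : Int) : List (List String) × List String :=
  if (PySem.List.pyGet? indices i).getD 0 - (PySem.List.pyGet? indices (i - 1)).getD 0 ≤ neighbor_threshold then
    (st.1, st.2 ++ [(PySem.List.pyGet? items i).getD ""])
  else
    (st.1 ++ [st.2], [(PySem.List.pyGet? items i).getD ""])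

def segment_contiguous (items : List String) (indices : List Int) (neighbor_threshold : Int) : List (List String) :=
  if items.length = 0 then []
  else
    let st := (PySem.List.pyRange 1 (items.length : Int)).foldl
      (segAStep items indices neighbor_threshold) ([], [(PySem.List.pyGet? items 0).getD ""])
    st.1 ++ [st.2]

-- ===== PORT B =====
-- one loop step of B: state is the boundaries list
def segBStep (indices : List Int) (neighbor_threshold : Int) (bs : List Int) (i : Int) : List Int :=
  if neighbor_threshold < (PySem.List.pyGet? indices i).getD 0 - (PySem.List.pyGet? indices (i - 1)).getD 0 then
    bs ++ [i]
  else bs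

def segment_contiguous_alt (items : List String) (indices : List Int) (neighbor_threshold : Int) : List (List String) :=
  if items.length = 0 then []
  else
    let boundaries := ((PySem.List.pyRange 1 (items.length : Int)).foldl
      (segBStep indices neighbor_threshold) [0]) ++ [(items.length : Int)]
    (boundaries.zip boundaries.tail).map (fun be => PySem.List.slice items (some be.1) (some be.2))

-- ===== PRECONDITION & SPEC =====
-- Pre_ excludes exactly the inputs where Python A (and B) raise IndexError: two or more items with fewer indices than items.
def Pre_segment_contiguous (items : List String) (indices : List Int) (neighbor_threshold : Int) : Prop :=
  items.length ≤ 1 ∨ items.length ≤ indices.length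
instance (items : List String) (indices : List Int) (neighbor_threshold : Int) : Decidable (Pre_segment_contiguous items indices neighbor_threshold) := by unfold Pre_segment_contiguous; infer_instance
def pvWitness_segment_contiguous : List String × List Int × Int := (["a", "b", "c"], [0, 1, 5], 1)

def Spec_segment_contiguous (items : List String) (indices : List Int) (neighbor_threshold : Int) (out : List (List String)) : Prop := out = segment_contiguous_alt items indices neighbor_threshold
instance (items : List String) (indices : List Int) (neighbor_threshold : Int) (out : List (List String)) : Decidable (Spec_segment_contiguous items indices neighbor_threshold out) := by unfold Spec_segment_contiguous; infer_instance

-- ===== CLAIM (what is proved, stated in full; the proofs are below) =====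
def Claim_equal_segment_contiguous : Prop := ∀ (items : List String) (indices : List Int) (neighbor_threshold : Int), Dom_segment_contiguous items indices neighbor_threshold → Pre_segment_contiguous items indices neighbor_threshold → Spec_segment_contiguous items indices neighbor_threshold (segment_contiguous items indices neighbor_threshold)

-- ===== LEMMAS AND PROOFS =====

-- B's comprehension over zip(boundaries, boundaries[1:]) as a function of the boundary list
def slicesOf (items : List String) (l : List Int) : List (List String) :=
  (l.zip l.tail).map (fun be => PySem.List.slice items (some be.1) (some be.2))

theorem slicesOf_cons₂ (items : List String) (b c : Int) (rest : List Int) :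
    slicesOf items (b :: c :: rest) = PySem.List.slice items (some b) (some c) :: slicesOf items (c :: rest) := by
  simp [slicesOf]

theorem slicesOf_snoc (items : List String) : ∀ (l0 : List Int) (b c : Int),
    slicesOf items (l0 ++ [b, c]) = slicesOf items (l0 ++ [b]) ++ [PySem.List.slice items (some b) (some c)]
  | [], b, c => by simp [slicesOf]
  | [x], b, c => by simp [slicesOf]
  | x :: y :: l0, b, c => by
    have ih := slicesOf_snoc items (y :: l0) b c
    simp only [List.cons_append] at ih ⊢
    rw [slicesOf_cons₂, slicesOf_cons₂, ih]
    simp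

-- the loop invariant tying A's (returned_items, tmp) to B's boundary list after m-1 iterations
theorem seg_inv (items : List String) (indices : List Int) (t : Int) :
    ∀ (m : Nat), 1 ≤ m → m ≤ items.length →
    ∃ (l0 : List Int) (b : Nat), b < m ∧
      (PySem.List.pyRange 1 (m : Int)).foldl (segBStep indices t) [0] = l0 ++ [(b : Int)] ∧
      ((PySem.List.pyRange 1 (m : Int)).foldl (segAStep items indices t)
          ([], [(PySem.List.pyGet? items 0).getD ""])).1 = slicesOf items (l0 ++ [(b : Int)]) ∧
      ((PySem.List.pyRange 1 (m : Int)).foldl (segAStep items indices t)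
          ([], [(PySem.List.pyGet? items 0).getD ""])).2
        = PySem.List.slice items (some (b : Int)) (some (m : Int)) := by
  intro m
  induction m with
  | zero => intro h; omega
  | succ m ih =>
    intro _ hlen
    by_cases hm : m = 0
    · -- base case m+1 = 1: empty range, initial states
      subst hm
      refine ⟨[], 0, by omega, ?_, ?_, ?_⟩
      · simp [PySem.List.pyRange]
      · simp [PySem.List.pyRange, slicesOf]
      · have h0 : 0 < items.length := by omega
        rw [PySem.List.slice_toNat items (by omega) (by omega)]
        cases items with
        | nil => simp at h0
        | cons x xs => simp [PySem.List.pyRange]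
    · -- step: range grows by [m]
      have h1m : 1 ≤ m := by omega
      have hmlt : m < items.length := by omega
      obtain ⟨l0, b, hb, hB, hA1, hA2⟩ := ih h1m (by omega)
      have hrange : PySem.List.pyRange 1 ((m + 1 : Nat) : Int) = PySem.List.pyRange 1 (m : Int) ++ [(m : Int)] := by
        have := PySem.List.pyRange_one_succ_right (a := 1) (b := (m : Int)) (by exact_mod_cast h1m)
        push_cast
        exact this
      have hitem : (PySem.List.pyGet? items (m : Int)).getD "" = items[m] := by
        rw [PySem.List.pyGet?_natCast, List.getElem?_eq_getElem hmlt]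
        rfl
      rw [hrange, List.foldl_append, List.foldl_append]
      simp only [List.foldl_cons, List.foldl_nil]
      by_cases hcut : t < (PySem.List.pyGet? indices (m : Int)).getD 0 - (PySem.List.pyGet? indices ((m : Int) - 1)).getD 0
      · -- gap: new group starts at m
        refine ⟨l0 ++ [(b : Int)], m, by omega, ?_, ?_, ?_⟩
        · rw [hB, segBStep, if_pos hcut]
        · rw [segAStep, if_neg (not_le.mpr hcut)]
          simp only [hA1, hA2]
          have hs := slicesOf_snoc items l0 ((b : Nat) : Int) ((m : Nat) : Int)
          simp only [List.append_assoc, List.cons_append] at hs ⊢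
          exact hs.symm
        · rw [segAStep, if_neg (not_le.mpr hcut)]
          simp only
          rw [PySem.List.slice_toNat items (by omega) (by omega)]
          have h1 : ((m + 1 : Nat) : Int).toNat - ((m : Nat) : Int).toNat = 1 := by omega
          rw [h1, Int.toNat_natCast, hitem, List.drop_eq_getElem_cons hmlt]
          rfl
      · -- no gap: tmp grows
        refine ⟨l0, b, by omega, ?_, ?_, ?_⟩
        · rw [hB, segBStep, if_neg hcut]
        · rw [segAStep, if_pos (not_lt.mp hcut)]
          simp only [hA1]
        · rw [segAStep, if_pos (not_lt.mp hcut)]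
          simp only [hA2]
          rw [PySem.List.slice_toNat items (by omega) (by omega),
              PySem.List.slice_toNat items (by omega) (by omega)]
          have he : ((m + 1 : Nat) : Int).toNat - ((b : Nat) : Int).toNat = (m - b) + 1 := by omega
          have he2 : ((m : Nat) : Int).toNat - ((b : Nat) : Int).toNat = m - b := by omega
          have he3 : ((b : Nat) : Int).toNat = b := Int.toNat_natCast b
          rw [he, he2, he3, List.take_add_one, List.getElem?_drop]
          have hsum : b + (m - b) = m := by omega
          rw [hsum, List.getElem?_eq_getElem hmlt]
          simp [PySem.List.pyGet?_natCast, List.getElem?_eq_getElem hmlt]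

-- ===== VERDICT (by name: the statement is the Claim_ definition above) =====
theorem segment_contiguous_spec : Claim_equal_segment_contiguous := by
  intro items indices t _ _
  unfold Spec_segment_contiguous segment_contiguous segment_contiguous_alt
  by_cases hnil : items.length = 0
  · simp [hnil]
  · rw [if_neg hnil, if_neg hnil]
    obtain ⟨l0, b, hb, hB, hA1, hA2⟩ := seg_inv items indices t items.length (by omega) (by omega)
    simp only [hB]
    have hs := slicesOf_snoc items l0 ((b : Nat) : Int) ((items.length : Nat) : Int)
    show _ ++ _ = slicesOf items ((l0 ++ [(b : Int)]) ++ [(items.length : Int)])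
    simp only [List.append_assoc, List.cons_append, List.nil_append] at hs ⊢
    rw [hs, ← hA1, ← hA2]
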